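-- pv_equiv track=rewrite | github.com/cafischer/cell_fitting | cell_fitting/optimization/helpers.py | get_ionlist
-- ===== SOURCE A (Python) =====
-- def get_ionlist(channel_list):
--     """
--     Get the ion names by the convention that the ion name is included in the channel name.
--     :param channel_list: List of channel names.
--     :type channel_list: list
--     :return: List of ion names.
--     :rtype: list
--     """
--     ion_list = []
--     for channel in channel_list:
--         if 'na' in channel:
--             ion_list.append('na')
--         elif 'k' in channel:
--             ion_list.append('k')
--         elif 'ca' in channel:
--             ion_list.append('ca')
--         else:
--             ion_list.append('')
--     return ion_list
-- ===== SOURCE B (Python) =====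
-- def get_ionlist(channel_list):
--     """Staged overwrite passes: one whole-list pass per ion in REVERSE priority
--     ('ca', 'k', 'na'); a later pass overwrites earlier matches, so the
--     highest-priority matching ion survives (na beats k beats ca)."""
--     result = [''] * len(channel_list)
--     for ion in ('ca', 'k', 'na'):
--         result = [ion if ion in channel else prev
--                   for channel, prev in zip(channel_list, result)]
--     return result
-- ===== Notes on version B (the rewrite author's own statement) =====
-- stated objective: alternative
-- what changed: Replaces the single per-element if/elif first-match cascade by three staged whole-list overwrite passes, one per ion in reverse priority order (ca, k, na), where a later pass overwrites earlier matches so the highest-priority ion survives.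
import Mathlib
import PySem

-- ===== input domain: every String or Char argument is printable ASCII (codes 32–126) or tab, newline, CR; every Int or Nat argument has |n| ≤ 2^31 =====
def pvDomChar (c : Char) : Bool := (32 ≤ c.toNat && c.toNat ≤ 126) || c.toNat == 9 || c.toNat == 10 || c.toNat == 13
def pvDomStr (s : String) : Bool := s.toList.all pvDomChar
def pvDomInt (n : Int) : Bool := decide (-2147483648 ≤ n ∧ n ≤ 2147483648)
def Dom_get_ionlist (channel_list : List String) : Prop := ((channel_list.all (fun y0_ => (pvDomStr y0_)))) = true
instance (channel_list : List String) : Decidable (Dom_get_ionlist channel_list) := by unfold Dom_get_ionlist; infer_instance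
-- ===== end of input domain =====

-- B replaces A's per-element if/elif cascade by three staged overwrite passes over the
-- whole list, one per ion in reverse priority order (alternative decomposition).

-- ===== PORT A =====
-- accumulator loop with the if/elif/else chain, as in A
def get_ionlist (channel_list : List String) : List String :=
  channel_list.foldl (fun ion_list channel =>
    ion_list ++ [if PySem.Str.isIn "na" channel then "na"
                 else if PySem.Str.isIn "k" channel then "k"
                 else if PySem.Str.isIn "ca" channel then "ca"
                 else ""]) []

-- ===== PORT B =====
-- result = [''] * len(channel_list); one overwrite pass per ion in ('ca','k','na')
def pvPass (channel_list : List String) (result : List String) (ion : String) : List String :=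
  (channel_list.zip result).map (fun p => if PySem.Str.isIn ion p.1 then ion else p.2)

def get_ionlist_alt (channel_list : List String) : List String :=
  (["ca", "k", "na"]).foldl (pvPass channel_list) (List.replicate channel_list.length "")

-- ===== PRECONDITION & SPEC =====
def Spec_get_ionlist (channel_list : List String) (out : List String) : Prop := out = get_ionlist_alt channel_list
instance (channel_list : List String) (out : List String) : Decidable (Spec_get_ionlist channel_list out) := by unfold Spec_get_ionlist; infer_instance

-- ===== CLAIM (what is proved, stated in full; the proofs are below) =====
def Claim_equal_get_ionlist : Prop := ∀ (channel_list : List String), Dom_get_ionlist channel_list → Spec_get_ionlist channel_list (get_ionlist channel_list)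

-- ===== LEMMAS AND PROOFS =====

-- B's three staged passes compute, pointwise, the same value as A's if/elif chain
theorem alt_eq_map (channel_list : List String) :
    get_ionlist_alt channel_list =
      channel_list.map (fun channel =>
        if PySem.Str.isIn "na" channel then "na"
        else if PySem.Str.isIn "k" channel then "k"
        else if PySem.Str.isIn "ca" channel then "ca"
        else "") := by
  unfold get_ionlist_alt
  simp only [List.foldl_cons, List.foldl_nil]
  induction channel_list with
  | nil => rfl
  | cons c t ih =>
    simp only [List.length_cons, List.replicate_succ, pvPass, List.zip_cons_cons,
      List.map_cons] at *
    refine congrArg₂ _ ?_ ih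
    split_ifs <;> simp_all

-- ===== VERDICT (by name: the statement is the Claim_ definition above) =====
theorem get_ionlist_spec : Claim_equal_get_ionlist := by
  intro channel_list _
  show get_ionlist channel_list = get_ionlist_alt channel_list
  rw [get_ionlist, PySem.List.foldl_append_singleton_eq_map, List.nil_append, alt_eq_map]
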